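-- pv_equiv track=rewrite | github.com/Jade-KR/TIL2 | algo/kakao/01.py | solution
-- ===== SOURCE A (Python) =====
-- def solution(new_id):
--     new_id = list(new_id)
--     answer = []
--     result = ''
--     check = ['-', '_', '.']
--     for i in new_id:
--         if i.isdigit():
--             answer.append(i)
--         elif 65 <= ord(i) <= 90:
--             answer.append(i.lower())
--         elif 96 < ord(i) < 123:
--             answer.append(i)
--         else:
--             if i in check:
--                 if len(answer) == 0:
--                     answer.append(i)
--                 else:
--                     if i == '.' and i != answer[-1]:
--                         answer.append(i)
--                     else:
--                         if i != '.':
--                             answer.append(i)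
--
--
--
--     while len(answer):
--         if answer[0] == '.':
--             answer.pop(0)
--         else:
--             break
--
--     while len(answer):
--         if answer[-1] == '.':
--             answer.pop()
--         else:
--             break
--
--     if len(answer) == 0:
--         answer = ['a']
--
--     if len(answer) >= 16:
--         answer = answer[0:16]
--         if answer[-1] == '.':
--             answer.pop()
--
--     if len(answer) <= 2:
--         while len(answer) <= 2:
--             answer.append(answer[-1])
--
--     for k in answer:
--         result += k
--     return result
-- ===== SOURCE B (Python) =====
-- def solution(new_id):
--     kept = ''.join(
--         chr(ord(c) + 32) if 'A' <= c <= 'Z' else c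
--         for c in new_id
--         if '0' <= c <= '9' or 'A' <= c <= 'Z' or 'a' <= c <= 'z' or c in '-_.'
--     )
--     core = '.'.join(piece for piece in kept.split('.') if piece)
--     if not core:
--         core = 'a'
--     if len(core) >= 16:
--         core = core[:16]
--         if core.endswith('.'):
--             core = core[:-1]
--     return core + core[-1] * (3 - len(core))
-- ===== Notes on version B (the rewrite author's own statement) =====
-- stated objective: simpler
-- what changed: A's single character loop with last-element dot checks plus two pop-while loops and an append-while loop is replaced by staged transformations: a filter/lowercase comprehension, one split/join pass on the dot separator that simultaneously collapses dot runs and strips leading/trailing dots, slicing, and arithmetic padding via string repetition.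
import Mathlib
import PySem

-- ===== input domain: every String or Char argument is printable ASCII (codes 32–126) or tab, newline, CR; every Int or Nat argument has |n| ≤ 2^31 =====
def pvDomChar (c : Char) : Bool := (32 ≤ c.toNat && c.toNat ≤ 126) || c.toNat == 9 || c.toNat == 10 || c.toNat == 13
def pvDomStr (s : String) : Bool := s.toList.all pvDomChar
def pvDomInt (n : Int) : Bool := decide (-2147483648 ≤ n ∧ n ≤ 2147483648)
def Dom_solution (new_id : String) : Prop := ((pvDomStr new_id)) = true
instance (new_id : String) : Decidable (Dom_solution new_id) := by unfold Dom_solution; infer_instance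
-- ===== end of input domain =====

-- B replaces A's index-juggling single loop and pop-loops by staged transformations:
-- filter+lowercase, then one split('.')/join pass that both collapses dot runs and strips
-- end dots, then the literal tail fixups (objective: simpler; return value only).


-- ===== PORT A =====
-- the body of A's for-loop (branch order as in the Python)
def pvStepA (answer : List Char) (i : Char) : List Char :=
  if PySem.Chars.isdigit i then answer ++ [i]
  else if 65 ≤ (i.toNat : Int) ∧ (i.toNat : Int) ≤ 90 then answer ++ [PySem.Chars.lowerChar i]
  else if 96 < (i.toNat : Int) ∧ (i.toNat : Int) < 123 then answer ++ [i]
  else if i ∈ ['-', '_', '.'] then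
    (if answer.length = 0 then answer ++ [i]
     else if i = '.' ∧ answer.getLast? ≠ some i then answer ++ [i]
     else if i ≠ '.' then answer ++ [i]
     else answer)
  else answer

-- 'while answer and answer[0] == '.': answer.pop(0)'
def pvPopFront : List Char → List Char
  | [] => []
  | c :: t => if c = '.' then pvPopFront t else c :: t

-- 'while answer and answer[-1] == '.': answer.pop()'
def pvPopBack (l : List Char) : List Char :=
  if h : l.getLast? = some '.' then pvPopBack l.dropLast else l
termination_by l.length
decreasing_by
  have hne : l ≠ [] := by rintro rfl; simp at h
  have := List.length_pos_of_ne_nil hne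
  simp only [List.length_dropLast]
  omega

-- 'while len(answer) <= 2: answer.append(answer[-1])' ('a' default never read: list nonempty there)
def pvPad (l : List Char) : List Char :=
  if h : l.length ≤ 2 then pvPad (l ++ [l.getLast?.getD 'a']) else l
termination_by 3 - l.length
decreasing_by simp; omega

def solution (new_id : String) : String :=
  let answer0 := new_id.toList.foldl pvStepA []
  let answer1 := pvPopFront answer0
  let answer2 := pvPopBack answer1
  let answer3 := if answer2.length = 0 then ['a'] else answer2
  let answer4 :=
    if 16 ≤ answer3.length then
      (let t := PySem.List.slice answer3 (some 0) (some 16)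
       if t.getLast? = some '.' then t.dropLast else t)
    else answer3
  let answer5 := if answer4.length ≤ 2 then pvPad answer4 else answer4
  String.mk (answer5.foldl (fun r k => r ++ [k]) [])

-- ===== PORT B =====
-- the generator's filter clause and its 'chr(ord(c)+32) if upper' expression
def pvKeep (c : Char) : Bool :=
  ('0' ≤ c && c ≤ '9') || ('A' ≤ c && c ≤ 'Z') || ('a' ≤ c && c ≤ 'z')
    || (c == '-' || c == '_' || c == '.')
def pvLower (c : Char) : Char :=
  if 'A' ≤ c ∧ c ≤ 'Z' then Char.ofNat (c.toNat + 32) else c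

def solution_alt (new_id : String) : String :=
  let kept := (new_id.toList.filter pvKeep).map pvLower
  let core0 := List.intercalate ['.'] ((kept.splitOn '.').filter (fun p => p ≠ []))
  let core1 := if core0 = [] then ['a'] else core0
  let core2 :=
    if 16 ≤ core1.length then
      (let t := PySem.List.slice core1 none (some 16)
       if PySem.Chars.endswith t ['.'] then PySem.List.slice t none (some (-1)) else t)
    else core1
  -- 'core + core[-1] * (3 - len(core))' ('a' default never read: core2 is nonempty)
  String.mk (core2 ++ List.replicate (3 - core2.length) (core2.getLast?.getD 'a'))

-- ===== PRECONDITION & SPEC =====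
def Spec_solution (new_id : String) (out : String) : Prop := out = solution_alt new_id
instance (new_id : String) (out : String) : Decidable (Spec_solution new_id out) := by unfold Spec_solution; infer_instance

-- ===== CLAIM (what is proved, stated in full; the proofs are below) =====
def Claim_equal_solution : Prop := ∀ (new_id : String), Dom_solution new_id → Spec_solution new_id (solution new_id)

-- ===== LEMMAS AND PROOFS =====

-- A's loop as a filterMap: the character classification shared by both programs
def pvF (c : Char) : Option Char := if pvKeep c then some (pvLower c) else none

-- dot-collapsing of an already filtered list, threading the previous kept character
def pvDD (prev : Option Char) : List Char → List Char
  | [] => []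
  | c :: t => if c = '.' ∧ prev = some '.' then pvDD prev t else c :: pvDD (some c) t

-- B's core as functions of the filtered list
def pvW (t : List Char) : List Char :=
  List.intercalate ['.'] ((t.splitOn '.').filter (fun p => p ≠ []))
def pvE (t : List Char) : List Char :=
  (t.splitOn '.').headI ++
    (if ((t.splitOn '.').tail.filter (fun p => p ≠ [])) = [] then []
     else '.' :: List.intercalate ['.'] ((t.splitOn '.').tail.filter (fun p => p ≠ [])))

lemma pvDD_cons (p : Option Char) (c : Char) (t : List Char) :
    pvDD p (c :: t) = if c = '.' ∧ p = some '.' then pvDD p t else c :: pvDD (some c) t := rfl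

lemma kept_eq (m : List Char) : (m.filter pvKeep).map pvLower = m.filterMap pvF := by
  induction m with
  | nil => rfl
  | cons c t ih =>
    simp only [List.filter_cons, List.filterMap_cons]
    cases h : pvKeep c
    · rw [show pvF c = none by simp [pvF, h]]
      simpa using ih
    · rw [show pvF c = some (pvLower c) by simp [pvF, h]]
      simp [ih]

lemma pvStepA_none (acc : List Char) (c : Char) (hf : pvF c = none) : pvStepA acc c = acc := by
  unfold pvF at hf
  split at hf
  · cases hf
  · next hk =>
    simp only [pvKeep, Bool.or_eq_true, Bool.and_eq_true, decide_eq_true_eq, beq_iff_eq,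
      not_or] at hk
    obtain ⟨⟨⟨hd, hu⟩, hl⟩, ⟨hm1, hm2⟩, hm3⟩ := hk
    rw [pvStepA, if_neg (by simp [PySem.Chars.isdigit]; intro hh; exact not_le.mp fun hb => hd ⟨hh, hb⟩),
      if_neg (by rintro ⟨ha, hb⟩; exact hu ⟨by exact_mod_cast ha, by exact_mod_cast hb⟩),
      if_neg (by
        rintro ⟨ha, hb⟩
        have haN : 96 < c.toNat := by exact_mod_cast ha
        have hbN : c.toNat < 123 := by exact_mod_cast hb
        exact hl ⟨(show (97:Nat) ≤ c.toNat by omega), (show c.toNat ≤ (122:Nat) by omega)⟩),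
      if_neg (by simp [hm1, hm2, hm3])]
lemma pvStepA_some (acc : List Char) (c c' : Char) (hf : pvF c = some c') :
    pvStepA acc c = if c' = '.' ∧ acc.getLast? = some '.' then acc else acc ++ [c'] := by
  unfold pvF at hf
  split at hf
  · next hk =>
    injection hf with hf
    subst hf
    simp only [pvKeep, Bool.or_eq_true, Bool.and_eq_true, decide_eq_true_eq, beq_iff_eq] at hk
    rcases hk with ((⟨h1, h2⟩ | ⟨h1, h2⟩) | ⟨h1, h2⟩) | ((rfl | rfl) | rfl)
    · -- digit
      have hn1 : (48:Nat) ≤ c.toNat := h1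
      have hn2 : c.toNat ≤ 57 := h2
      have hlow : pvLower c = c := by
        rw [pvLower, if_neg]; rintro ⟨ha, _⟩; have : (65:Nat) ≤ c.toNat := ha; omega
      rw [pvStepA, if_pos (by simp [PySem.Chars.isdigit]; exact ⟨h1, h2⟩), hlow, if_neg]
      rintro ⟨rfl, _⟩; exact absurd hn1 (by decide)
    · -- upper
      have hn1 : (65:Nat) ≤ c.toNat := h1
      have hn2 : c.toNat ≤ 90 := h2
      have hv : (Char.ofNat (c.toNat + 32)).toNat = c.toNat + 32 := by
        rw [Char.toNat_ofNat, if_pos (Or.inl (by omega))]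
      have hlow : pvLower c = Char.ofNat (c.toNat + 32) := by rw [pvLower, if_pos ⟨h1, h2⟩]
      have hlc : PySem.Chars.lowerChar c = Char.ofNat (c.toNat + 32) := by
        rw [PySem.Chars.lowerChar, if_pos (by simp [PySem.Chars.isupper]; exact ⟨h1, h2⟩)]
      rw [pvStepA,
        if_neg (by
          simp [PySem.Chars.isdigit]
          intro hh
          exact not_le.mp fun hb => absurd (show c.toNat ≤ (57:Nat) from hb) (by omega)),
        if_pos (by constructor <;> [exact_mod_cast hn1; exact_mod_cast hn2]), hlc, hlow, if_neg]
      rintro ⟨he, _⟩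
      have h2 := congrArg Char.toNat he
      rw [hv] at h2
      have h46 : ('.' : Char).toNat = 46 := by decide
      rw [h46] at h2
      omega
    · -- lower
      have hn1 : (97:Nat) ≤ c.toNat := h1
      have hn2 : c.toNat ≤ 122 := h2
      have hlow : pvLower c = c := by
        rw [pvLower, if_neg]; rintro ⟨_, hb⟩; have hb' : c.toNat ≤ (90:Nat) := hb; omega
      have hdig : ¬ (PySem.Chars.isdigit c = true) := by
        simp [PySem.Chars.isdigit]
        intro hh
        exact not_le.mp fun hb => absurd (show c.toNat ≤ (57:Nat) from hb) (by omega)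
      have hupp : ¬ (65 ≤ (c.toNat : Int) ∧ (c.toNat : Int) ≤ 90) := by
        rintro ⟨_, hb⟩
        have hb' : c.toNat ≤ 90 := by exact_mod_cast hb
        omega
      have hlo : (96 < (c.toNat : Int) ∧ (c.toNat : Int) < 123) := by
        constructor
        · exact_mod_cast (show 96 < c.toNat by omega)
        · exact_mod_cast (show c.toNat < 123 by omega)
      rw [pvStepA, if_neg hdig, if_neg hupp, if_pos hlo, hlow, if_neg]
      rintro ⟨rfl, _⟩; exact absurd hn1 (by decide)
    · -- '-'
      rw [pvStepA, if_neg (by decide), if_neg (by decide), if_neg (by decide),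
        if_pos (by decide), (by decide : pvLower '-' = '-')]
      by_cases hl : acc.length = 0 <;> simp [hl]
    · -- '_'
      rw [pvStepA, if_neg (by decide), if_neg (by decide), if_neg (by decide),
        if_pos (by decide), (by decide : pvLower '_' = '_')]
      by_cases hl : acc.length = 0 <;> simp [hl]
    · -- '.'
      rw [pvStepA, if_neg (by decide), if_neg (by decide), if_neg (by decide),
        if_pos (by decide), (by decide : pvLower '.' = '.')]
      by_cases h0 : acc = []
      · subst h0; simp
      · have hl : ¬ acc.length = 0 := by simpa using h0
        by_cases hlast : acc.getLast? = some '.' <;> simp [hl, hlast]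
  · cases hf

lemma main_loop (m : List Char) : ∀ acc,
    m.foldl pvStepA acc = acc ++ pvDD acc.getLast? (m.filterMap pvF) := by
  induction m with
  | nil => intro acc; simp [pvDD]
  | cons c t ih =>
    intro acc
    simp only [List.foldl_cons, List.filterMap_cons]
    cases hf : pvF c with
    | none => rw [pvStepA_none acc c hf]; exact ih acc
    | some c' =>
      rw [pvStepA_some acc c c' hf]
      by_cases hs : c' = '.' ∧ acc.getLast? = some '.'
      · rw [if_pos hs, ih acc]
        simp only [pvDD, if_pos hs]
      · rw [if_neg hs, ih (acc ++ [c'])]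
        simp only [pvDD, if_neg hs, List.getLast?_concat, List.append_assoc,
          List.cons_append, List.nil_append]

lemma splitOn_cons_dot (t : List Char) : ('.' :: t).splitOn '.' = [] :: t.splitOn '.' := by
  simp [List.splitOn, List.splitOnP_cons]

lemma splitOn_cons_ne {c : Char} (hc : c ≠ '.') (t : List Char) :
    (c :: t).splitOn '.' = List.modifyHead (List.cons c) (t.splitOn '.') := by
  simp [List.splitOn, List.splitOnP_cons, hc]

lemma intercalate_cons (x : List Char) (xs : List (List Char)) :
    List.intercalate ['.'] (x :: xs) =
      x ++ (if xs = [] then [] else '.' :: List.intercalate ['.'] xs) := by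
  cases xs <;> simp [List.intercalate, List.intersperse]

lemma pvW_nil_iff (t : List Char) :
    pvW t = [] ↔ (t.splitOn '.').filter (fun p => p ≠ []) = [] := by
  constructor
  · intro h
    by_contra hne
    obtain ⟨x, xs, hL⟩ := List.exists_cons_of_ne_nil hne
    have hx : x ≠ [] := by
      have hmem : x ∈ (t.splitOn '.').filter (fun p => p ≠ []) := by
        rw [hL]; exact List.mem_cons_self
      simpa using List.of_mem_filter hmem
    rw [pvW, hL, intercalate_cons] at h
    exact hx (List.append_eq_nil_iff.mp h).1
  · intro h
    rw [pvW, h]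
    simp [List.intercalate]

lemma pvW_cons_dot (t : List Char) : pvW ('.' :: t) = pvW t := by
  simp [pvW, splitOn_cons_dot]

lemma pvW_cons_ne {c : Char} (hc : c ≠ '.') (t : List Char) :
    pvW (c :: t) = c :: pvE t := by
  obtain ⟨hh, tl, hsp⟩ : ∃ hh tl, t.splitOn '.' = hh :: tl := by
    rcases hsp' : t.splitOn '.' with _ | ⟨a, b⟩
    · exact absurd hsp' (List.splitOnP_ne_nil _ t)
    · exact ⟨a, b, rfl⟩
  rw [pvW, pvE, splitOn_cons_ne hc, hsp]
  simp only [List.modifyHead, List.headI, List.tail_cons]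
  rw [List.filter_cons, if_pos (by simp), intercalate_cons]
  rfl

lemma pvE_eq_pvW_nil : pvE [] = pvW [] := by
  simp [pvE, pvW, List.splitOn, List.splitOnP_nil, List.intercalate]

lemma pvE_eq_pvW_ne {c : Char} (hc : c ≠ '.') (t : List Char) :
    pvE (c :: t) = pvW (c :: t) := by
  obtain ⟨hh, tl, hsp⟩ : ∃ hh tl, t.splitOn '.' = hh :: tl := by
    rcases hsp' : t.splitOn '.' with _ | ⟨a, b⟩
    · exact absurd hsp' (List.splitOnP_ne_nil _ t)
    · exact ⟨a, b, rfl⟩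
  rw [pvW_cons_ne hc, pvE, pvE, splitOn_cons_ne hc, hsp]
  simp only [List.modifyHead, List.headI, List.tail_cons]
  rfl

lemma pvDD_some_ne {c : Char} (hc : c ≠ '.') (t : List Char) :
    pvDD (some c) t = pvDD none t := by
  cases t with
  | nil => rfl
  | cons d r =>
    simp only [pvDD]
    have : ¬ (d = '.' ∧ (some c : Option Char) = some '.') := by
      rintro ⟨_, h⟩; exact hc (by injection h)
    rw [if_neg this, if_neg (by rintro ⟨_, h⟩; cases h)]

lemma pvDD_some_dot (t : List Char) :
    pvDD (some '.') t = pvDD none (t.dropWhile (· = '.')) := by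
  induction t with
  | nil => rfl
  | cons d r ih =>
    rw [pvDD_cons, List.dropWhile_cons]
    by_cases hd : d = '.'
    · subst hd
      rw [if_pos ⟨rfl, rfl⟩, if_pos (by simp), ih]
    · rw [if_neg (by rintro ⟨h, _⟩; exact hd h), if_neg (by simp [hd]), pvDD_cons,
        if_neg (by rintro ⟨_, h⟩; cases h)]

lemma pvPopBack_eq (l : List Char) :
    pvPopBack l = (l.reverse.dropWhile (· = '.')).reverse := by
  induction hn : l.length using Nat.strong_induction_on generalizing l with
  | _ n ih =>
  rw [pvPopBack]
  split
  · next h =>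
    rcases List.eq_nil_or_concat l with rfl | ⟨s, a, rfl⟩
    · simp at h
    · have ha : a = '.' := by simpa using h
      subst ha
      rw [List.concat_eq_append] at hn ⊢
      rw [show (s ++ ['.']).dropLast = s by simp,
        ih s.length (by rw [← hn]; simp) s rfl]
      simp
  · next h =>
    rcases List.eq_nil_or_concat l with rfl | ⟨s, a, rfl⟩
    · simp
    · have ha : a ≠ '.' := by simpa using h
      simp [List.dropWhile_cons, ha]

lemma pvPopBack_cons_ne {c : Char} (hc : c ≠ '.') (x : List Char) :
    pvPopBack (c :: x) = c :: pvPopBack x := by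
  rw [pvPopBack_eq, pvPopBack_eq, List.reverse_cons, List.dropWhile_append]
  by_cases he : (x.reverse.dropWhile (· = '.')).isEmpty = true
  · rw [if_pos he]
    rw [List.isEmpty_iff] at he
    simp [hc, he]
  · rw [if_neg (by simp [he])]
    simp

lemma pvPopBack_cons_dot (x : List Char) :
    pvPopBack ('.' :: x) = if pvPopBack x = [] then [] else '.' :: pvPopBack x := by
  rw [pvPopBack_eq, pvPopBack_eq, List.reverse_cons, List.dropWhile_append]
  by_cases he : (x.reverse.dropWhile (· = '.')).isEmpty = true
  · rw [if_pos he]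
    rw [List.isEmpty_iff] at he
    simp [he]
  · rw [if_neg (by simp [he])]
    rw [List.isEmpty_iff] at he
    simp [he]

lemma pvPieces_dropWhile (r : List Char) :
    ((r.dropWhile (· = '.')).splitOn '.').filter (fun p => p ≠ []) =
      (r.splitOn '.').filter (fun p => p ≠ []) := by
  induction r with
  | nil => rfl
  | cons d s ih =>
    by_cases hd : d = '.'
    · subst hd; simpa [splitOn_cons_dot] using ih
    · simp [hd]

lemma pvW_nil : pvW [] = [] := by
  simp [pvW, List.splitOn, List.splitOnP_nil, List.intercalate]

lemma pvPopBack_nil : pvPopBack [] = [] := by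
  rw [pvPopBack]; simp

lemma pvE_nil : pvE [] = [] := pvE_eq_pvW_nil.trans pvW_nil

lemma pvE_cons_dot (r : List Char) :
    pvE ('.' :: r) =
      if (r.splitOn '.').filter (fun p => p ≠ []) = [] then []
      else '.' :: List.intercalate ['.'] ((r.splitOn '.').filter (fun p => p ≠ [])) := by
  rw [pvE, splitOn_cons_dot]
  simp [List.headI]

lemma pvW_dropWhile (r : List Char) : pvW (r.dropWhile (· = '.')) = pvW r := by
  rw [pvW, pvW, pvPieces_dropWhile]

lemma dropWhile_head_ne (r : List Char) (d : Char) (sfx : List Char)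
    (h : r.dropWhile (· = '.') = d :: sfx) : d ≠ '.' := by
  induction r with
  | nil => simp at h
  | cons a t ih =>
    rw [List.dropWhile_cons] at h
    by_cases ha : a = '.'
    · rw [if_pos (by simp [ha])] at h
      exact ih h
    · rw [if_neg (by simp [ha])] at h
      exact fun hd => ha ((List.cons.injEq a t d sfx ▸ h).1.trans hd)

lemma pvE_dropWhile_eq_pvW (r : List Char) :
    pvE (r.dropWhile (· = '.')) = pvW (r.dropWhile (· = '.')) := by
  rcases hE : r.dropWhile (· = '.') with _ | ⟨d, sfx⟩
  · rw [pvE_nil, pvW_nil]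
  · exact pvE_eq_pvW_ne (dropWhile_head_ne r d sfx hE) sfx

lemma pvInner (n : Nat) : ∀ t : List Char, t.length ≤ n →
    pvPopBack (pvDD none t) = pvE t := by
  induction n with
  | zero =>
    intro t ht
    have h0 : t = [] := List.eq_nil_of_length_eq_zero (Nat.le_zero.mp ht)
    subst h0
    rw [show pvDD none [] = [] from rfl, pvPopBack_nil, pvE_nil]
  | succ m ih =>
    intro t ht
    rcases t with _ | ⟨c, r⟩
    · rw [show pvDD none [] = [] from rfl, pvPopBack_nil, pvE_nil]
    · by_cases hc : c = '.'
      · subst hc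
        rw [pvDD_cons, if_neg (by rintro ⟨_, h⟩; cases h), pvDD_some_dot, pvPopBack_cons_dot,
          ih (r.dropWhile (· = '.'))
            (le_trans (List.length_dropWhile_le _ _) (Nat.le_of_succ_le_succ ht)),
          pvE_dropWhile_eq_pvW, pvW_dropWhile, pvE_cons_dot]
        by_cases hf : (r.splitOn '.').filter (fun p => p ≠ []) = []
        · rw [if_pos ((pvW_nil_iff r).mpr hf), if_pos hf]
        · rw [if_neg (fun h => hf ((pvW_nil_iff r).mp h)), if_neg hf, pvW]
      · rw [pvDD_cons, if_neg (by rintro ⟨h, _⟩; exact hc h), pvDD_some_ne hc,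
          pvPopBack_cons_ne hc, ih r (Nat.le_of_succ_le_succ ht),
          pvE_eq_pvW_ne hc, pvW_cons_ne hc]

lemma pvPopFront_dd_some_dot (t : List Char) :
    pvPopFront (pvDD (some '.') t) = pvPopFront (pvDD none t) := by
  cases t with
  | nil => rfl
  | cons d r =>
    by_cases hd : d = '.'
    · subst hd
      rw [pvDD_cons, if_pos ⟨rfl, rfl⟩, pvDD_cons, if_neg (by rintro ⟨_, h⟩; cases h)]
      rw [show pvPopFront ('.' :: pvDD (some '.') r) = pvPopFront (pvDD (some '.') r) from by
        simp [pvPopFront]]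
    · rw [pvDD_cons, if_neg (by rintro ⟨h, _⟩; exact hd h), pvDD_cons,
        if_neg (by rintro ⟨_, h⟩; cases h)]

lemma pvTop (k : List Char) : pvPopBack (pvPopFront (pvDD none k)) = pvW k := by
  induction k with
  | nil => rw [show pvDD none [] = [] from rfl, show pvPopFront [] = [] from rfl,
      pvPopBack_nil, pvW_nil]
  | cons c t ih =>
    by_cases hc : c = '.'
    · subst hc
      rw [pvDD_cons, if_neg (by rintro ⟨_, h⟩; cases h)]
      rw [show pvPopFront ('.' :: pvDD (some '.') t) = pvPopFront (pvDD (some '.') t) from by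
        simp [pvPopFront]]
      rw [pvPopFront_dd_some_dot, ih, pvW_cons_dot]
    · rw [pvDD_cons, if_neg (by rintro ⟨h, _⟩; exact hc h), pvDD_some_ne hc]
      rw [show pvPopFront (c :: pvDD none t) = c :: pvDD none t from by simp [pvPopFront, hc]]
      rw [pvPopBack_cons_ne hc, pvInner t.length t le_rfl, pvW_cons_ne hc]

lemma pvPad_eq (n : Nat) : ∀ l : List Char, l ≠ [] → 3 - l.length = n →
    pvPad l = l ++ List.replicate n (l.getLast?.getD 'a') := by
  induction n with
  | zero =>
    intro l _ h3
    rw [pvPad, dif_neg (by omega)]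
    simp
  | succ m ih =>
    intro l hne h3
    have hlen : l.length ≤ 2 := by omega
    rw [pvPad, dif_pos hlen]
    obtain ⟨sfx, a, rfl⟩ := (List.eq_nil_or_concat l).resolve_left hne
    have hga : (sfx.concat a).getLast?.getD 'a' = a := by simp
    rw [hga, ih ((sfx.concat a) ++ [a]) (by simp) (by simp at h3 ⊢; omega)]
    simp [List.replicate_succ]

lemma slice_zero_to (l : List Char) (b : Int) :
    PySem.List.slice l (some 0) (some b) = PySem.List.slice l none (some b) := by
  simp [PySem.List.slice, PySem.List.clampIdx]

lemma slice_neg_one (l : List Char) : PySem.List.slice l none (some (-1)) = l.dropLast := by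
  simp only [PySem.List.slice, PySem.List.clampIdx]
  norm_num
  rcases l with _ | ⟨c, t⟩
  · simp
  · rw [List.dropLast_eq_take]
    simp

lemma endswith_dot_iff (t : List Char) :
    PySem.Chars.endswith t ['.'] = true ↔ t.getLast? = some '.' := by
  rw [PySem.Chars.endswith_iff]
  constructor
  · rintro ⟨s, rfl⟩; exact List.getLast?_concat
  · intro h
    rcases List.eq_nil_or_concat t with rfl | ⟨s, a, rfl⟩
    · simp at h
    · simp at h
      exact ⟨s, by rw [h, List.concat_eq_append]⟩

lemma padStage (l : List Char) (h : l ≠ []) :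
    (if l.length ≤ 2 then pvPad l else l) =
      l ++ List.replicate (3 - l.length) (l.getLast?.getD 'a') := by
  by_cases hl : l.length ≤ 2
  · rw [if_pos hl, pvPad_eq (3 - l.length) l h rfl]
  · rw [if_neg hl, show 3 - l.length = 0 by omega]
    simp

lemma truncStage (c1 : List Char) :
    (if 16 ≤ c1.length then
      (if (PySem.List.slice c1 (some 0) (some 16)).getLast? = some '.' then
        (PySem.List.slice c1 (some 0) (some 16)).dropLast
       else PySem.List.slice c1 (some 0) (some 16))
     else c1) =
    (if 16 ≤ c1.length then
      (if PySem.Chars.endswith (PySem.List.slice c1 none (some 16)) ['.'] then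
        PySem.List.slice (PySem.List.slice c1 none (some 16)) none (some (-1))
       else PySem.List.slice c1 none (some 16))
     else c1) := by
  rw [slice_zero_to]
  by_cases h16 : 16 ≤ c1.length
  · rw [if_pos h16, if_pos h16]
    by_cases hd : (PySem.List.slice c1 none (some 16)).getLast? = some '.'
    · rw [if_pos hd, if_pos ((endswith_dot_iff _).mpr hd), slice_neg_one]
    · rw [if_neg hd, if_neg (fun h => hd ((endswith_dot_iff _).mp h))]
  · rw [if_neg h16, if_neg h16]

lemma truncNe (c1 : List Char) (h : c1 ≠ []) :
    (if 16 ≤ c1.length then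
      (if PySem.Chars.endswith (PySem.List.slice c1 none (some 16)) ['.'] then
        PySem.List.slice (PySem.List.slice c1 none (some 16)) none (some (-1))
       else PySem.List.slice c1 none (some 16))
     else c1) ≠ [] := by
  by_cases h16 : 16 ≤ c1.length
  · rw [if_pos h16]
    have ht : (PySem.List.slice c1 none (some 16)).length = 16 := by
      rw [PySem.List.slice_to c1 (by norm_num)]
      simp
      omega
    by_cases hd : PySem.Chars.endswith (PySem.List.slice c1 none (some 16)) ['.'] = true
    · rw [if_pos hd, slice_neg_one]
      intro hnil
      have := congrArg List.length hnil
      simp [ht] at this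
    · rw [if_neg hd]
      intro hnil
      have := congrArg List.length hnil
      simp [ht] at this
  · rw [if_neg h16]; exact h

-- ===== VERDICT (by name: the statement is the Claim_ definition above) =====
theorem solution_spec : Claim_equal_solution := by
  intro new_id _
  unfold Spec_solution
  simp only [solution, solution_alt]
  rw [show new_id.toList.foldl pvStepA [] = pvDD none (new_id.toList.filterMap pvF) from
    main_loop _ []]
  rw [pvTop, ← kept_eq, pvW]
  generalize ['.'].intercalate
      (List.filter (fun p => decide (p ≠ []))
        (List.splitOn '.' (List.map pvLower (List.filter pvKeep new_id.toList)))) = q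
  rw [PySem.List.foldl_append_singleton, List.nil_append]
  rw [show (if q.length = 0 then (['a'] : List Char) else q) = (if q = [] then ['a'] else q) from
    by simp [List.length_eq_zero_iff]]
  have hc1 : (if q = [] then (['a'] : List Char) else q) ≠ [] := by
    by_cases h : q = [] <;> simp [h]
  rw [truncStage]
  rw [padStage _ (truncNe _ hc1)]
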